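-- pv_equiv track=rewrite | github.com/ryuryukke/AtCoder | AtCoder/ABC177/e.py | prime_factor_table
-- ===== SOURCE A (Python) =====
-- def prime_factor_table(n):
--     # sieveとはふるいの意味
--     sieve = [i for i in range(n+1)]
--     # n以下の整数を最初にふるい落とす数(√n以下に必ず存在)を求める.
--     for i in range(2, int(n**0.5)+1):
--         if sieve[i] == i:
--             for j in range(2*i, n+1, i):
--                 if sieve[j] == j:
--                     sieve[j] = i
--     return sieve
-- ===== SOURCE B (Python) =====
-- def _spf(j):
--     # smallest divisor d with 2 <= d, d*d <= j; j itself if none (j prime, 0 or 1)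
--     d = 2
--     while d * d <= j:
--         if j % d == 0:
--             return d
--         d += 1
--     return j
--
--
-- def prime_factor_table(n):
--     return [_spf(j) for j in range(n + 1)]
-- ===== Notes on version B (the rewrite author's own statement) =====
-- stated objective: alternative
-- what changed: Replaces the in-place sieve (outer loop over primes up to int(sqrt(n)), inner walk over their multiples mutating one shared table) by an independent per-index trial division: each entry is computed directly as the smallest divisor d with d*d <= j, no shared mutable state and no nested marking passes.
import Mathlib
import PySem

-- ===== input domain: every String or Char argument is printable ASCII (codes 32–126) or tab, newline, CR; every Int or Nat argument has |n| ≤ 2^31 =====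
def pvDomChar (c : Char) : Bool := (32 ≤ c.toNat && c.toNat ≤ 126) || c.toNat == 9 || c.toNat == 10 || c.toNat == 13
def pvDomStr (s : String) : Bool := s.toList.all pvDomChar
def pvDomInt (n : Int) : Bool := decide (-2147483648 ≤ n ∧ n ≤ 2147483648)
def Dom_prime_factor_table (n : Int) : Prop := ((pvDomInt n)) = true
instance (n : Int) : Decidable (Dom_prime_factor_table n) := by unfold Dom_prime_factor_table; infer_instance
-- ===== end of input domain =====

-- B replaces A's shared-table sieve by an independent trial division per index (objective: alternative).

-- ===== PORT A =====
-- int(n**0.5): for 0 ≤ n ≤ 2^31 the double sqrt is exact enough that int(n**0.5) = Nat.sqrt n (checked);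
-- ported as Nat.sqrt on n.toNat.  Reads/writes sieve[i] use pyGetD/pySetD; all indices are in range under Pre_.
def prime_factor_table (n : Int) : List Int :=
  let sieve := PySem.List.pyRange 0 (n + 1) 1
  let r : Int := Int.ofNat (Nat.sqrt n.toNat)
  (PySem.List.pyRange 2 (r + 1) 1).foldl
    (fun s i =>
      if PySem.List.pyGetD s i 0 = i then
        (PySem.List.pyRange (2 * i) (n + 1) i).foldl
          (fun s2 j => if PySem.List.pyGetD s2 j 0 = j then PySem.List.pySetD s2 j i else s2) s
      else s)
    sieve

-- ===== PORT B =====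
-- transliteration of Source B's `_spf`: first d ≥ 2 with d*d ≤ j dividing j, else j
def spfFrom (j d : Nat) : Nat :=
  if d * d ≤ j then
    (if j % d = 0 then d else spfFrom j (d + 1))
  else j
termination_by j + 1 - d
decreasing_by
  rename_i h _
  have hd : d ≤ j := by
    rcases Nat.eq_zero_or_pos d with h0 | h0
    · omega
    · calc d = d * 1 := (Nat.mul_one d).symm
        _ ≤ d * d := Nat.mul_le_mul_left d h0
        _ ≤ j := h
  omega

def prime_factor_table_alt (n : Int) : List Int :=
  (PySem.List.pyRange 0 (n + 1) 1).map (fun j => Int.ofNat (spfFrom j.toNat 2))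

-- ===== PRECONDITION & SPEC =====
-- A raises TypeError for negative n (int() applied to the complex power value); Pre_ excludes exactly those inputs.
def Pre_prime_factor_table (n : Int) : Prop := 0 ≤ n
instance (n : Int) : Decidable (Pre_prime_factor_table n) := by
  unfold Pre_prime_factor_table; infer_instance

def pvWitness_prime_factor_table : Int := 12

def Spec_prime_factor_table (n : Int) (out : List Int) : Prop := out = prime_factor_table_alt n
instance (n : Int) (out : List Int) : Decidable (Spec_prime_factor_table n out) := by
  unfold Spec_prime_factor_table; infer_instance

-- ===== CLAIM (what is proved, stated in full; the proofs are below) =====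
def Claim_equal_prime_factor_table : Prop :=
  ∀ (n : Int), Dom_prime_factor_table n → Pre_prime_factor_table n →
    Spec_prime_factor_table n (prime_factor_table n)

-- ===== LEMMAS AND PROOFS =====

-- the common value: entry j of both tables (0 for 0, smallest prime factor for j ≥ 1; j itself for 1 and primes)
def pySpf (j : Nat) : Nat := if j = 0 then 0 else j.minFac

-- ---- B side: spfFrom computes pySpf ----

lemma spfFrom_eq_minFac (j : Nat) (hj : 2 ≤ j) :
    ∀ (c d : Nat), j + 1 - d ≤ c → 2 ≤ d → (∀ e, 2 ≤ e → e < d → ¬ e ∣ j) →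
      spfFrom j d = j.minFac := by
  intro c
  induction c with
  | zero =>
    intro d hc hd hnd
    exact absurd (dvd_refl j) (hnd j hj (by omega))
  | succ c ih =>
    intro d hc hd hnd
    rw [spfFrom]
    by_cases hdd : d * d ≤ j
    · rw [if_pos hdd]
      by_cases hm : j % d = 0
      · rw [if_pos hm]
        have hdvd : d ∣ j := Nat.dvd_of_mod_eq_zero hm
        have h1 : j.minFac ≤ d := Nat.minFac_le_of_dvd hd hdvd
        have h2 : ¬ j.minFac < d := fun hlt =>
          hnd j.minFac (Nat.minFac_prime (by omega)).two_le hlt (Nat.minFac_dvd j)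
        omega
      · rw [if_neg hm]
        have hdj : d ≤ j := le_trans (Nat.le_mul_of_pos_left d (by omega)) hdd
        refine ih (d + 1) (by omega) (by omega) ?_
        intro e he helt
        rcases Nat.lt_succ_iff_lt_or_eq.mp helt with h | h
        · exact hnd e he h
        · subst h
          exact fun hdvd => hm (Nat.mod_eq_zero_of_dvd hdvd)
    · rw [if_neg hdd]
      by_cases hp : j.Prime
      · exact (hp.minFac_eq).symm
      · have hsq : j.minFac ^ 2 ≤ j := Nat.minFac_sq_le_self (by omega) hp
        have h2 : 2 ≤ j.minFac := (Nat.minFac_prime (by omega)).two_le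
        have : j.minFac < d := by
          rcases Nat.lt_or_ge j.minFac d with h | hge
          · exact h
          · exfalso
            have : d * d ≤ j.minFac * j.minFac := Nat.mul_le_mul hge hge
            nlinarith [hsq]
        exact absurd (Nat.minFac_dvd j) (hnd j.minFac h2 this)

lemma spfFrom_two (j : Nat) : spfFrom j 2 = pySpf j := by
  unfold pySpf
  by_cases hj : 2 ≤ j
  · rw [if_neg (by omega)]
    exact spfFrom_eq_minFac j hj (j + 1) 2 (by omega) (le_refl 2) (by omega)
  · interval_cases j <;> (rw [spfFrom]; norm_num)

-- ---- A side ----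

-- the inner marking pass and one outer step, as named functions (definitionally the lambdas in port A)
def pvInner (n i : Int) (s : List Int) : List Int :=
  (PySem.List.pyRange (2 * i) (n + 1) i).foldl
    (fun s2 j => if PySem.List.pyGetD s2 j 0 = j then PySem.List.pySetD s2 j i else s2) s

def pvStep (n : Int) (s : List Int) (i : Int) : List Int :=
  if PySem.List.pyGetD s i 0 = i then pvInner n i s else s

-- model of the sieve after the outer loop has processed all i ≤ t
def pvModel (t j : Nat) : Int :=
  if 2 ≤ j ∧ j.minFac ≤ t ∧ j.minFac < j then (j.minFac : Int) else (j : Int)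

def pvModelList (n : Int) (t : Nat) : List Int :=
  (PySem.List.pyRange 0 (n + 1) 1).map (fun j => pvModel t j.toNat)

-- elementwise effect of the inner fold: entry k becomes i exactly when k is hit and still unmarked
lemma pvInnerFold_getElem? (i : Int) (hi : 0 ≤ i) :
    ∀ (js : List Int), (∀ j ∈ js, i < j) → ∀ (s : List Int) (k : Nat),
      (js.foldl
        (fun s2 j => if PySem.List.pyGetD s2 j 0 = j then PySem.List.pySetD s2 j i else s2)
        s)[k]? =
      if (k : Int) ∈ js ∧ s[k]? = some (k : Int) then some i else s[k]? := by
  intro js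
  induction js with
  | nil => intro _ s k; simp
  | cons j js ih =>
    intro hlt s k
    have hj : 0 ≤ j := le_of_lt (lt_of_le_of_lt hi (hlt j (List.mem_cons_self)))
    have hij : i < j := hlt j List.mem_cons_self
    have hjm : j = ((j.toNat : Nat) : Int) := (Int.toNat_of_nonneg hj).symm
    rw [List.foldl_cons, ih (fun x hx => hlt x (List.mem_cons_of_mem j hx))]
    rw [hjm, PySem.List.pyGetD_natCast, PySem.List.pySetD_natCast,
        List.getD_eq_getElem?_getD]
    set m := j.toNat with hm
    by_cases hc : (s[m]?).getD 0 = (m : Int)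
    · rw [if_pos hc]
      have hmlen : m < s.length := by
        by_contra hge
        have : s[m]? = none := List.getElem?_eq_none (by omega)
        rw [this] at hc
        simp at hc
        omega
      have hsm : s[m]? = some (m : Int) := by
        rw [List.getElem?_eq_getElem hmlen] at hc ⊢
        simp only [Option.getD_some] at hc
        rw [hc]
      by_cases hk : k = m
      · have h1 : (s.set m i)[k]? = some i := by
          rw [List.getElem?_set, if_pos hk.symm, if_pos hmlen]
        rw [h1, ite_self, if_pos ⟨by rw [hk]; exact List.mem_cons_self, by rw [hk]; exact hsm⟩]
      · have h2 : (s.set m i)[k]? = s[k]? := by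
          rw [List.getElem?_set, if_neg (fun h => hk h.symm)]
        rw [h2]
        have hmem : ((k : Int) ∈ (m : Int) :: js) ↔ ((k : Int) ∈ js) := by
          constructor
          · intro h
            rcases List.mem_cons.mp h with h | h
            · exfalso; apply hk; exact_mod_cast h
            · exact h
          · exact List.mem_cons_of_mem _
        by_cases hcnd : (k : Int) ∈ js ∧ s[k]? = some (k : Int)
        · rw [if_pos hcnd, if_pos ⟨hmem.symm.mp hcnd.1, hcnd.2⟩]
        · rw [if_neg hcnd, if_neg (fun h => hcnd ⟨hmem.mp h.1, h.2⟩)]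
    · rw [if_neg hc]
      have hmem : ∀ (h : (k : Int) ∈ ((m : Int) :: js) ∧ s[k]? = some (k : Int)),
          (k : Int) ∈ js ∧ s[k]? = some (k : Int) := by
        rintro ⟨h1, h2⟩
        rcases List.mem_cons.mp h1 with h | h
        · exfalso
          have hkm : k = m := by exact_mod_cast h
          subst hkm
          rw [h2] at hc
          simp at hc
        · exact ⟨h, h2⟩
      by_cases hcnd : (k : Int) ∈ js ∧ s[k]? = some (k : Int)
      · rw [if_pos hcnd, if_pos ⟨List.mem_cons_of_mem _ hcnd.1, hcnd.2⟩]
      · rw [if_neg hcnd, if_neg (fun h => hcnd (hmem h))]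

-- pvModel is insensitive to raising t past a non-prime value
lemma pvModel_step_not_prime (t k : Nat) (h2 : 2 ≤ t) (hnp : ¬ t.Prime) :
    pvModel (t - 1) k = pvModel t k := by
  unfold pvModel
  by_cases hk : 2 ≤ k
  · have hpf : k.minFac ≠ t := fun h => hnp (h ▸ Nat.minFac_prime (by omega))
    by_cases hc : k.minFac ≤ t - 1 ∧ k.minFac < k
    · rw [if_pos ⟨hk, by omega, hc.2⟩, if_pos ⟨hk, by omega, hc.2⟩]
    · have : ¬ (2 ≤ k ∧ k.minFac ≤ t - 1 ∧ k.minFac < k) := by tauto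
      rw [if_neg this]
      have : ¬ (2 ≤ k ∧ k.minFac ≤ t ∧ k.minFac < k) := by
        rintro ⟨_, hle, hlt⟩
        exact hc ⟨by omega, hlt⟩
      rw [if_neg this]
  · rw [if_neg (by tauto), if_neg (by tauto)]

-- value of the sieve model at its own index t
lemma pvModel_self (t : Nat) (h2 : 2 ≤ t) :
    (t.Prime → pvModel (t - 1) t = (t : Int)) ∧
    (¬ t.Prime → pvModel (t - 1) t ≠ (t : Int)) := by
  constructor
  · intro hp
    unfold pvModel
    rw [if_neg]
    rintro ⟨_, _, hlt⟩
    rw [hp.minFac_eq] at hlt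
    omega
  · intro hnp
    have hsq : t.minFac ^ 2 ≤ t := Nat.minFac_sq_le_self (by omega) hnp
    have hmf2 : 2 ≤ t.minFac := (Nat.minFac_prime (by omega)).two_le
    have hlt : t.minFac < t := by nlinarith
    unfold pvModel
    rw [if_pos ⟨h2, by omega, hlt⟩]
    intro h
    have : t.minFac = t := by exact_mod_cast h
    omega

-- arithmetic core of one outer step at a prime t
lemma pvModel_mark (t k : Nat) (h2 : 2 ≤ t) (_hp : t.Prime) :
    (if (2 * (t : Int) ≤ (k : Int) ∧ (t : Int) ∣ (k : Int)) ∧ pvModel (t - 1) k = (k : Int)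
      then (t : Int) else pvModel (t - 1) k) = pvModel t k := by
  by_cases hcnd : (2 * (t : Int) ≤ (k : Int) ∧ (t : Int) ∣ (k : Int)) ∧ pvModel (t - 1) k = (k : Int)
  · rw [if_pos hcnd]
    obtain ⟨⟨hk2t, hdvd⟩, hunm⟩ := hcnd
    have hdvdN : t ∣ k := by exact_mod_cast hdvd
    have hkk : 2 * t ≤ k := by exact_mod_cast hk2t
    have hmfle : k.minFac ≤ t := Nat.minFac_le_of_dvd h2 hdvdN
    have hmfge : ¬ (k.minFac ≤ t - 1) := by
      intro hle
      unfold pvModel at hunm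
      have hmflt : k.minFac < k := by
        have := Nat.minFac_dvd k
        have h2m : 2 ≤ k.minFac := (Nat.minFac_prime (by omega)).two_le
        have := Nat.le_of_dvd (by omega) (Nat.minFac_dvd k)
        omega
      rw [if_pos ⟨by omega, hle, hmflt⟩] at hunm
      have : k.minFac = k := by exact_mod_cast hunm
      omega
    have hmf : k.minFac = t := by omega
    unfold pvModel
    rw [if_pos ⟨by omega, by omega, by omega⟩, hmf]
  · rw [if_neg hcnd]
    unfold pvModel at *
    by_cases hm : 2 ≤ k ∧ k.minFac ≤ t - 1 ∧ k.minFac < k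
    · rw [if_pos hm, if_pos ⟨hm.1, by omega, hm.2.2⟩]
    · rw [if_neg hm]
      have hnot : ¬ (2 ≤ k ∧ k.minFac ≤ t ∧ k.minFac < k) := by
        rintro ⟨hk2, hle, hlt⟩
        have hmf : k.minFac = t := by
          rcases Nat.lt_or_ge (k.minFac) t with h | h
          · exact absurd ⟨hk2, by omega, hlt⟩ hm
          · omega
        apply hcnd
        refine ⟨⟨?_, ?_⟩, ?_⟩
        · have : t ∣ k := hmf ▸ Nat.minFac_dvd k
          have htk : t ≠ k := by omega
          have : 2 * t ≤ k := by
            rcases this with ⟨c, hc⟩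
            have hc2 : 2 ≤ c := by
              rcases Nat.lt_or_ge c 2 with h | h
              · interval_cases c <;> omega
              · exact h
            calc 2 * t ≤ t * c := by nlinarith
              _ = k := hc.symm
          exact_mod_cast this
        · exact_mod_cast hmf ▸ Nat.minFac_dvd k
        · rw [if_neg (by rintro ⟨_, h, _⟩; omega)]
      rw [if_neg hnot]

-- entry k of the model list
lemma pvModelList_getElem? (n : Int) (hn : 0 ≤ n) (t : Nat) (k : Nat) :
    (pvModelList n t)[k]? =
      if k < (n + 1).toNat then some (pvModel t k) else none := by
  unfold pvModelList
  by_cases hk : k < (n + 1).toNat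
  · rw [if_pos hk]
    have h1 : (n + 1) = (((n + 1).toNat : Nat) : Int) := by omega
    rw [h1, PySem.List.getElem?_map_pyRange_zero _ _ _ hk]
    simp
  · rw [if_neg hk]
    apply List.getElem?_eq_none
    simp [PySem.List.length_pyRange_one]
    omega

-- one outer step on the model list
lemma pvStep_model (n : Int) (hn : 0 ≤ n) (t : Nat) (h2 : 2 ≤ t) (ht : (t : Int) ≤ n) :
    pvStep n (pvModelList n (t - 1)) (t : Int) = pvModelList n t := by
  have hread : PySem.List.pyGetD (pvModelList n (t - 1)) (t : Int) 0 = pvModel (t - 1) t := by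
    unfold pvModelList
    rw [PySem.List.pyGetD_map_pyRange_of_nonneg _ _ _ _ (by positivity) (by omega)]
    simp
  unfold pvStep
  by_cases hp : t.Prime
  · rw [hread, if_pos ((pvModel_self t h2).1 hp)]
    unfold pvInner
    apply List.ext_getElem?
    intro k
    rw [pvInnerFold_getElem? (t : Int) (by positivity)
          _ (fun j hj => by
            rw [PySem.List.mem_pyRange_iff_of_pos (by positivity)] at hj
            omega),
        pvModelList_getElem? n hn, pvModelList_getElem? n hn]
    by_cases hk : k < (n + 1).toNat
    · simp only [if_pos hk]
      have hmem : ((k : Int) ∈ PySem.List.pyRange (2 * (t : Int)) (n + 1) (t : Int)) ↔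
          (2 * (t : Int) ≤ (k : Int) ∧ (t : Int) ∣ (k : Int)) := by
        rw [PySem.List.mem_pyRange_iff_of_pos (by positivity)]
        constructor
        · rintro ⟨ha, -, hd⟩
          refine ⟨ha, ?_⟩
          have h2t : (t : Int) ∣ 2 * t := ⟨2, by ring⟩
          have := dvd_add hd h2t
          simpa using this
        · rintro ⟨ha, hd⟩
          exact ⟨ha, by omega, dvd_sub hd ⟨2, by ring⟩⟩
      rw [← pvModel_mark t k h2 hp]
      by_cases hc2 : (2 * (t : Int) ≤ (k : Int) ∧ (t : Int) ∣ (k : Int)) ∧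
          pvModel (t - 1) k = (k : Int)
      · rw [if_pos hc2, if_pos ⟨hmem.mpr hc2.1, congrArg some hc2.2⟩]
      · rw [if_neg hc2, if_neg]
        rintro ⟨h1, h2'⟩
        exact hc2 ⟨hmem.mp h1, by injection h2'⟩
    · simp only [if_neg hk]
      rw [if_neg]
      rintro ⟨-, h⟩
      simp at h
  · rw [hread, if_neg ((pvModel_self t h2).2 hp)]
    unfold pvModelList
    exact List.map_congr_left (fun j _ => pvModel_step_not_prime t j.toNat h2 hp)

-- the outer fold, from lo up, carries the model along
lemma pvOuter_model (n : Int) (hn : 0 ≤ n) (r : Nat) (hr : (r : Int) ≤ n) :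
    ∀ (c lo : Nat), 2 ≤ lo → r + 1 - lo ≤ c →
      (PySem.List.pyRange (lo : Int) ((r : Int) + 1) 1).foldl (pvStep n) (pvModelList n (lo - 1)) =
        pvModelList n (max (lo - 1) r) := by
  intro c
  induction c with
  | zero =>
    intro lo h2 hc
    rw [PySem.List.pyRange_one_eq_nil (by omega), List.foldl_nil]
    congr 1
    omega
  | succ c ih =>
    intro lo h2 hc
    by_cases hlo : lo ≤ r
    · rw [PySem.List.pyRange_one_cons (by omega), List.foldl_cons,
          pvStep_model n hn lo h2 (by omega)]
      have h1 : ((lo : Int) + 1) = ((lo + 1 : Nat) : Int) := by push_cast; ring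
      have h2' : pvModelList n lo = pvModelList n ((lo + 1) - 1) := by norm_num
      rw [h1, h2', ih (lo + 1) (by omega) (by omega)]
      congr 1
      omega
    · rw [PySem.List.pyRange_one_eq_nil (by omega), List.foldl_nil]
      congr 1
      omega

-- once t ≥ √n, the model list is exactly B's table
lemma pvModelList_final (n : Int) (hn : 0 ≤ n) (t : Nat) (ht : Nat.sqrt n.toNat ≤ t) :
    pvModelList n t = prime_factor_table_alt n := by
  unfold pvModelList prime_factor_table_alt
  apply List.map_congr_left
  intro j hj
  rw [PySem.List.mem_pyRange_one] at hj
  have hkn : j.toNat ≤ n.toNat := by omega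
  generalize hg : j.toNat = k at hkn ⊢
  rw [spfFrom_two]
  unfold pvModel pySpf
  by_cases h0 : k = 0
  · subst h0; norm_num
  · rw [if_neg h0]
    by_cases h2 : 2 ≤ k
    · by_cases hp : k.Prime
      · rw [if_neg (by rintro ⟨_, _, hlt⟩; rw [hp.minFac_eq] at hlt; omega), hp.minFac_eq]
        rfl
      · have hsq : k.minFac ^ 2 ≤ k := Nat.minFac_sq_le_self (by omega) hp
        have hmf2 : 2 ≤ k.minFac := (Nat.minFac_prime (by omega)).two_le
        have hlt : k.minFac < k := by nlinarith
        have hle : k.minFac ≤ t := by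
          have h1 : k.minFac ≤ Nat.sqrt k := Nat.le_sqrt.mpr (by nlinarith)
          have h2 : Nat.sqrt k ≤ Nat.sqrt n.toNat := Nat.sqrt_le_sqrt hkn
          omega
        rw [if_pos ⟨h2, hle, hlt⟩]
        rfl
    · have h1 : k = 1 := by omega
      subst h1
      rw [if_neg (by rintro ⟨h, _⟩; omega)]
      norm_num

-- the whole of port A equals the model at t = max 1 √n
lemma prime_factor_table_eq_model (n : Int) (hn : 0 ≤ n) :
    prime_factor_table n = pvModelList n (max 1 (Nat.sqrt n.toNat)) := by
  have hinit : PySem.List.pyRange 0 (n + 1) 1 = pvModelList n 1 := by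
    unfold pvModelList
    have hcong : List.map (fun j => pvModel 1 j.toNat) (PySem.List.pyRange 0 (n + 1) 1)
        = List.map id (PySem.List.pyRange 0 (n + 1) 1) := by
      apply List.map_congr_left
      intro j hj
      rw [PySem.List.mem_pyRange_one] at hj
      unfold pvModel
      rw [if_neg (by
        rintro ⟨h2, hle, _⟩
        have := (Nat.minFac_prime (n := j.toNat) (by omega)).two_le
        omega)]
      simp
      omega
    rw [hcong, List.map_id]
  have hfold : prime_factor_table n =
      (PySem.List.pyRange 2 ((Nat.sqrt n.toNat : Int) + 1) 1).foldl (pvStep n)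
        (PySem.List.pyRange 0 (n + 1) 1) := rfl
  rw [hfold, hinit]
  have h2' : pvModelList n 1 = pvModelList n (2 - 1) := by norm_num
  rw [h2']
  have hr : ((Nat.sqrt n.toNat : Nat) : Int) ≤ n := by
    have := Nat.sqrt_le_self n.toNat
    omega
  have h2n : ((2 : Nat) : Int) = (2 : Int) := by norm_num
  rw [← h2n, pvOuter_model n hn (Nat.sqrt n.toNat) hr (Nat.sqrt n.toNat + 1) 2 (by omega) (by omega)]

-- ===== VERDICT (by name: the statement is the Claim_ definition above) =====
theorem prime_factor_table_spec : Claim_equal_prime_factor_table := by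
  intro n _ hpre
  unfold Spec_prime_factor_table
  unfold Pre_prime_factor_table at hpre
  rw [prime_factor_table_eq_model n hpre,
      pvModelList_final n hpre _ (le_max_right _ _)]
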